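-- pv_equiv track=rewrite | github.com/joshanashakya/dissertation | workspace/dataset/java-python/GeeksForGeeks/2962/A/2.py | calculate
-- ===== SOURCE A (Python) =====
-- def calculate( N ):
--     length = len(N)
--     l = int((length) / 2)
--     count = 0
--
--     for i in range(l + 1):
--
--         # substring representing int a
--         s = N[0: 0 + i]
--
--         # no of digits in a
--         l1 = len(s)
--
--         # consider only most significant
--         # l1 characters of remaining
--         # string for int b
--         t = N[i: l1 + i]
--
--         # if any of a or b contains
--         # leading 0s discard this
--         try:
--             if s[0] == '0' or t[0] == '0':
--                 continue
--         except:
--             continue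
--
--         # if both are equal
--         if s == t:
--             count+=1
--     return count
-- ===== SOURCE B (Python) =====
-- def calculate(N):
--     # Z-algorithm: z[i] >= i tests N[:i] == N[i:2*i] in O(1) after O(n) preprocessing.
--     n = len(N)
--     if n == 0:
--         return 0
--     if N[0] == '0':
--         return 0
--     z = [0] * n
--     l = 0
--     r = 0
--     for i in range(1, n):
--         k = min(r - i, z[i - l]) if i < r else 0
--         while i + k < n and N[i + k] == N[k]:
--             k += 1
--         z[i] = k
--         if i + k > r:
--             l = i
--             r = i + k
--     count = 0
--     for i in range(1, n // 2 + 1):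
--         if N[i] != '0' and z[i] >= i:
--             count += 1
--     return count
-- ===== Notes on version B (the rewrite author's own statement) =====
-- stated objective: faster
-- what changed: Replaces A's loop that slices out N[:i] and N[i:2i] and compares them afresh for every split point by a single Z-algorithm pass, after which each split point is tested in O(1) via z[i] >= i (plus early exits for the empty string and a leading '0').
import Mathlib
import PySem

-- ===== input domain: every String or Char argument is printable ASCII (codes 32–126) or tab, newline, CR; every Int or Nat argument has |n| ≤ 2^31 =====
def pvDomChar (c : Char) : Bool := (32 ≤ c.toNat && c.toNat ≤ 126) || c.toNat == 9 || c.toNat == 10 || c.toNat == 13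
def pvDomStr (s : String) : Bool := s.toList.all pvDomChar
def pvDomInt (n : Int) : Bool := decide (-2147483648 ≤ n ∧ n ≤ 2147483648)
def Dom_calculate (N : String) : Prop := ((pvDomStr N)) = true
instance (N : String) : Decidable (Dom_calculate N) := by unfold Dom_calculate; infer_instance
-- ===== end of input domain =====

-- B replaces A's quadratic slice-and-compare loop by the linear Z-algorithm (z[i] ≥ i decides N[:i] == N[i:2i]).

-- ===== PORT A =====
-- 'int(length/2)' is ported as Nat floor division: exact, since len/2 is an exact
-- float for all lengths below 2^53 and int() truncates the nonnegative result.
def calculate (N : String) : Int :=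
  let cs := N.toList
  let length := cs.length
  let l := length / 2
  (List.range (l + 1)).foldl (fun (count : Int) (i : Nat) =>
    let s := PySem.List.slice cs (some 0) (some (0 + (i : Int)))
    let l1 := s.length
    let t := PySem.List.slice cs (some (i : Int)) (some ((l1 : Int) + (i : Int)))
    match s, t with
    | [], _ => count                       -- s[0] raises IndexError → continue
    | c :: _, t' =>
      if c = '0' then count                -- leading zero in a → continue
      else match t' with
        | [] => count                      -- t[0] raises IndexError → continue
        | d :: _ =>
          if d = '0' then count            -- leading zero in b → continue
          else if s = t then count + 1 else count) 0

-- ===== PORT B =====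
-- the inner 'while' of the Z-algorithm (indices are in range whenever the guard holds,
-- so getD with a dummy default is exact)
def extendZ (cs : List Char) (i k : Nat) : Nat :=
  if i + k < cs.length ∧ cs.getD (i + k) 'a' = cs.getD k 'a' then extendZ cs i (k + 1)
  else k
termination_by cs.length - (i + k)
decreasing_by omega

-- the 'for i in range(1, n)' loop of Source B, as structural recursion on i with the same state
def zLoop (cs : List Char) (i : Nat) (z : List Nat) (l r : Nat) : List Nat :=
  if i < cs.length then
    let k0 := if i < r then min (r - i) (z.getD (i - l) 0) else 0
    let k := extendZ cs i k0
    let z' := z.set i k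
    if i + k > r then zLoop cs (i + 1) z' i (i + k) else zLoop cs (i + 1) z' l r
  else z
termination_by cs.length - i

def calculate_alt (N : String) : Int :=
  let cs := N.toList
  let n := cs.length
  if n = 0 then 0
  else if cs.getD 0 'a' = '0' then 0
  else
    let z := zLoop cs 1 (List.replicate n 0) 0 0
    (List.range' 1 (n / 2)).foldl (fun (count : Int) (i : Nat) =>
      if cs.getD i 'a' ≠ '0' ∧ i ≤ z.getD i 0 then count + 1 else count) 0

-- ===== PRECONDITION & SPEC =====
def Spec_calculate (N : String) (out : Int) : Prop := out = calculate_alt N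
instance (N : String) (out : Int) : Decidable (Spec_calculate N out) := by unfold Spec_calculate; infer_instance

-- ===== CLAIM (what is proved, stated in full; the proofs are below) =====
def Claim_equal_calculate : Prop := ∀ (N : String), Dom_calculate N → Spec_calculate N (calculate N)

-- ===== LEMMAS AND PROOFS =====

-- length of the longest common prefix of two character lists
def lcp : List Char → List Char → Nat
  | a :: as, b :: bs => if a = b then lcp as bs + 1 else 0
  | _, _ => 0

theorem lcp_le_left : ∀ (a b : List Char), lcp a b ≤ a.length := by
  intro a
  induction a with
  | nil => intro b; cases b <;> simp [lcp]
  | cons x as ih =>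
    intro b; cases b with
    | nil => simp [lcp]
    | cons y bs =>
      by_cases h : x = y <;> simp [lcp, h]
      exact ih bs

theorem lcp_le_right : ∀ (a b : List Char), lcp a b ≤ b.length := by
  intro a
  induction a with
  | nil => intro b; cases b <;> simp [lcp]
  | cons x as ih =>
    intro b; cases b with
    | nil => simp [lcp]
    | cons y bs =>
      by_cases h : x = y <;> simp [lcp, h]
      exact ih bs

theorem take_lcp : ∀ (a b : List Char), a.take (lcp a b) = b.take (lcp a b) := by
  intro a
  induction a with
  | nil => intro b; cases b <;> simp [lcp]
  | cons x as ih =>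
    intro b; cases b with
    | nil => simp [lcp]
    | cons y bs =>
      by_cases h : x = y <;> simp [lcp, h]
      exact ih bs

theorem lcp_ge : ∀ (a b : List Char) (k : Nat), k ≤ a.length → a.take k = b.take k → k ≤ lcp a b := by
  intro a
  induction a with
  | nil => intro b k hk _; simp at hk; omega
  | cons x as ih =>
    intro b k hk ht
    cases k with
    | zero => omega
    | succ k' =>
      cases b with
      | nil => simp at ht
      | cons y bs =>
        simp only [List.take_succ_cons, List.cons.injEq] at ht
        obtain ⟨rfl, ht'⟩ := ht
        have := ih bs k' (by simpa using hk) ht'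
        simp [lcp]
        omega

theorem lcp_lt_ne : ∀ (a b : List Char) (d : Char), lcp a b < a.length → lcp a b < b.length →
    a.getD (lcp a b) d ≠ b.getD (lcp a b) d := by
  intro a
  induction a with
  | nil => intro b d h _; simp at h
  | cons x as ih =>
    intro b d h1 h2
    cases b with
    | nil => simp at h2
    | cons y bs =>
      by_cases h : x = y
      · subst h
        simp only [lcp] at h1 h2 ⊢
        simpa using ih bs d (by simpa using h1) (by simpa using h2)
      · simp only [lcp, if_neg h] at h1 h2 ⊢
        simpa using h

-- indices below a common prefix agree
theorem getD_eq_of_take_eq (a b : List Char) (m j : Nat) (d : Char)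
    (h : a.take m = b.take m) (hj : j < m) : a.getD j d = b.getD j d := by
  have h' : a[j]? = b[j]? := by
    have : (a.take m)[j]? = (b.take m)[j]? := by rw [h]
    simpa [List.getElem?_take, hj] using this
  simp [List.getD_eq_getElem?_getD, h']

theorem getD_drop (cs : List Char) (i k : Nat) (d : Char) :
    (cs.drop i).getD k d = cs.getD (i + k) d := by
  simp [List.getD_eq_getElem?_getD, List.getElem?_drop]

-- prefixes of take-equal lists agree
theorem take_eq_take_of_prefix {a b : List Char} {p m : Nat}
    (h : a.take p = b.take p) (hm : m ≤ p) : a.take m = b.take m := by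
  have : (a.take p).take m = (b.take p).take m := by rw [h]
  simpa [List.take_take, Nat.min_eq_left hm] using this

theorem extendZ_correct (cs : List Char) (i : Nat) (hi : 1 ≤ i) :
    ∀ k, k ≤ lcp cs (cs.drop i) → extendZ cs i k = lcp cs (cs.drop i) := by
  intro k hk
  generalize hL : lcp cs (cs.drop i) = L at *
  induction hd : L - k generalizing k with
  | zero =>
    have hkL : k = L := by omega
    subst hkL
    rw [extendZ]
    rw [if_neg]
    rintro ⟨hlen, heq⟩
    have hd1 : k < (cs.drop i).length := by simp; omega
    have hd2 : k < cs.length := by omega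
    have hne := lcp_lt_ne cs (cs.drop i) 'a' (by omega) (by rw [hL]; exact hd1)
    rw [hL] at hne
    rw [getD_drop] at hne
    exact hne heq.symm
  | succ n ih =>
    have hklt : k < L := by omega
    have hdlen : L ≤ (cs.drop i).length := by rw [← hL]; exact lcp_le_right _ _
    have hilen : i + k < cs.length := by simp at hdlen; omega
    rw [extendZ]
    rw [if_pos]
    · exact ih (k + 1) (by omega) (by omega)
    · refine ⟨hilen, ?_⟩
      have h1 : cs.getD k 'a' = (cs.drop i).getD k 'a' := by
        apply getD_eq_of_take_eq cs (cs.drop i) L k 'a' _ hklt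
        rw [← hL]; exact take_lcp _ _
      rw [h1, getD_drop]

-- the z-box lower bound: inside a known box, min(r - i, z[i - l]) is a common-prefix length at i
theorem box_le (cs : List Char) (l i : Nat) (_hl : 1 ≤ l) (hli : l < i)
    (hir : i < l + lcp cs (cs.drop l)) :
    min (l + lcp cs (cs.drop l) - i) (lcp cs (cs.drop (i - l))) ≤ lcp cs (cs.drop i) := by
  set L := lcp cs (cs.drop l) with hLdef
  set m := min (l + L - i) (lcp cs (cs.drop (i - l))) with hm
  have hm2 : m ≤ lcp cs (cs.drop (i - l)) := Nat.min_le_right _ _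
  apply lcp_ge
  · exact le_trans hm2 (lcp_le_left _ _)
  · have h1 : cs.take m = (cs.drop (i - l)).take m :=
      take_eq_take_of_prefix (take_lcp cs (cs.drop (i - l))) hm2
    have h2 : (cs.drop (i - l)).take m = (cs.drop i).take m := by
      have hTL : cs.take L = (cs.drop l).take L := take_lcp cs (cs.drop l)
      have hdropped : (cs.take L).drop (i - l) = ((cs.drop l).take L).drop (i - l) := by rw [hTL]
      rw [List.drop_take, List.drop_take, List.drop_drop] at hdropped
      have hil : l + (i - l) = i := by omega
      rw [hil] at hdropped
      exact take_eq_take_of_prefix hdropped (by omega)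
    exact h1.trans h2

def ZInv (cs : List Char) (i : Nat) (z : List Nat) (l r : Nat) : Prop :=
  z.length = cs.length ∧
  (∀ j, 1 ≤ j → j < i → z.getD j 0 = lcp cs (cs.drop j)) ∧
  ((l = 0 ∧ r = 0) ∨ (1 ≤ l ∧ l < i ∧ r = l + lcp cs (cs.drop l)))

theorem getD_set_self (z : List Nat) (i v : Nat) (h : i < z.length) :
    (z.set i v).getD i 0 = v := by
  simp [List.getD_eq_getElem?_getD, h]

theorem getD_set_ne (z : List Nat) (i j v : Nat) (h : i ≠ j) :
    (z.set i v).getD j 0 = z.getD j 0 := by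
  simp [List.getD_eq_getElem?_getD, List.getElem?_set_ne h]

theorem zLoop_correct (cs : List Char) : ∀ (i : Nat) (z : List Nat) (l r : Nat),
    1 ≤ i → ZInv cs i z l r →
    ∀ j, 1 ≤ j → j < cs.length → (zLoop cs i z l r).getD j 0 = lcp cs (cs.drop j) := by
  intro i z l r hi hinv j hj1 hj2
  induction hd : cs.length - i generalizing i z l r with
  | zero =>
    rw [zLoop, if_neg (by omega)]
    exact hinv.2.1 j hj1 (by omega)
  | succ n ih =>
    have hilen : i < cs.length := by omega
    obtain ⟨hlen, hz, hbox⟩ := hinv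
    rw [zLoop, if_pos hilen]
    simp only []
    have hk0 : (if i < r then min (r - i) (z.getD (i - l) 0) else 0) ≤ lcp cs (cs.drop i) := by
      split
      · next hir =>
        rcases hbox with ⟨rfl, rfl⟩ | ⟨hl1, hli, hr⟩
        · omega
        · rw [hz (i - l) (by omega) (by omega)]
          rw [hr] at hir ⊢
          exact box_le cs l i hl1 hli hir
      · omega
    have hkeq : extendZ cs i (if i < r then min (r - i) (z.getD (i - l) 0) else 0) =
        lcp cs (cs.drop i) := extendZ_correct cs i hi _ hk0
    set k := extendZ cs i (if i < r then min (r - i) (z.getD (i - l) 0) else 0) with hkdef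
    have hznew : ∀ j', 1 ≤ j' → j' < i + 1 → (z.set i k).getD j' 0 = lcp cs (cs.drop j') := by
      intro j' h1 h2
      by_cases hji : j' = i
      · subst hji
        rw [getD_set_self z j' k (by omega), hkeq]
      · rw [getD_set_ne z i j' k (fun h => hji h.symm)]
        exact hz j' h1 (by omega)
    have hlen' : (z.set i k).length = cs.length := by simp [hlen]
    split
    · next hgt =>
      exact ih (i + 1) (z.set i k) i (i + k) (by omega)
        ⟨hlen', hznew, Or.inr ⟨by omega, by omega, by rw [hkeq]⟩⟩ (by omega)
    · next hng =>
      refine ih (i + 1) (z.set i k) l r (by omega) ⟨hlen', hznew, ?_⟩ (by omega)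
      rcases hbox with ⟨rfl, rfl⟩ | ⟨hl1, hli, hr⟩
      · exact Or.inl ⟨rfl, rfl⟩
      · exact Or.inr ⟨hl1, by omega, hr⟩

-- s == t in A is exactly i ≤ lcp at i
theorem take_eq_iff_le_lcp (cs : List Char) (i : Nat) (h : 2 * i ≤ cs.length) :
    (cs.take i = (cs.drop i).take i) ↔ i ≤ lcp cs (cs.drop i) := by
  constructor
  · intro ht; exact lcp_ge cs (cs.drop i) i (by omega) ht
  · intro hle
    exact take_eq_take_of_prefix (take_lcp cs (cs.drop i)) hle

-- A's loop body, for i ≤ n/2, as a plain 0/1 counting step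
theorem stepA (cs : List Char) (i : Nat) (hi : i ≤ cs.length / 2) (acc : Int) :
    (let s := PySem.List.slice cs (some 0) (some (0 + (i : Int)))
     let l1 := s.length
     let t := PySem.List.slice cs (some (i : Int)) (some ((l1 : Int) + (i : Int)))
     match s, t with
     | [], _ => acc
     | c :: _, t' =>
       if c = '0' then acc
       else match t' with
         | [] => acc
         | d :: _ =>
           if d = '0' then acc
           else if s = t then acc + 1 else acc) =
    (if 1 ≤ i ∧ cs.getD 0 'a' ≠ '0' ∧ cs.getD i 'a' ≠ '0' ∧ cs.take i = (cs.drop i).take i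
     then acc + 1 else acc) := by
  have hs : PySem.List.slice cs (some 0) (some (0 + (i : Int))) = cs.take i := by
    rw [zero_add]
    simp [PySem.List.slice_zero_start, PySem.List.slice_to_natCast]
  have hlt : (cs.take i).length = i := by
    simp [List.length_take]
    omega
  have ht : PySem.List.slice cs (some (i : Int)) (some ((i : Int) + (i : Int))) =
      (cs.drop i).take i := by
    rw [show ((i : Int) + (i : Int)) = (((i + i : Nat)) : Int) by push_cast; ring]
    rw [PySem.List.slice_natCast]
    congr 1
    omega
  simp only [hs, hlt, ht]
  cases i with
  | zero => simp
  | succ i' =>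
    have h2i : 2 * (i' + 1) ≤ cs.length := by omega
    cases cs with
    | nil => simp at h2i
    | cons c0 cs' =>
      obtain ⟨d0, rest, hdr⟩ : ∃ d0 rest, (c0 :: cs').drop (i' + 1) = d0 :: rest := by
        cases hh : (c0 :: cs').drop (i' + 1) with
        | nil =>
          have hlen0 : ((c0 :: cs').drop (i' + 1)).length = 0 := by rw [hh]; rfl
          simp at hlen0 h2i
          omega
        | cons d0 rest => exact ⟨d0, rest, rfl⟩
      have hd0 : (c0 :: cs').getD (i' + 1) 'a' = d0 := by
        have hgd := getD_drop (c0 :: cs') (i' + 1) 0 'a'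
        rw [hdr] at hgd
        simpa using hgd.symm
      simp only [hdr, hd0, List.take_succ_cons, List.getD_cons_zero]
      by_cases hc0 : c0 = '0'
      · simp [hc0]
      · by_cases hd0' : d0 = '0'
        · simp [hc0, hd0']
        · by_cases heq : c0 :: List.take i' cs' = d0 :: List.take i' rest
          · simp [heq, hc0, hd0']
          · simp [heq, hc0, hd0']

theorem countP_eq_final (cs : List Char) (h0 : cs.getD 0 'a' ≠ '0') :
    (List.range (cs.length / 2 + 1)).countP
      (fun i => decide (1 ≤ i ∧ cs.getD 0 'a' ≠ '0' ∧ cs.getD i 'a' ≠ '0' ∧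
        cs.take i = (cs.drop i).take i)) =
    (List.range' 1 (cs.length / 2)).countP
      (fun i => decide (cs.getD i 'a' ≠ '0' ∧ i ≤ lcp cs (cs.drop i))) := by
  rw [List.range_eq_range', List.range'_succ, List.countP_cons]
  have hp0 : decide (1 ≤ 0 ∧ cs.getD 0 'a' ≠ '0' ∧ cs.getD 0 'a' ≠ '0' ∧
      cs.take 0 = (cs.drop 0).take 0) = false := by
    simp
  rw [hp0]
  simp only [Nat.zero_add, Nat.add_zero, if_false, Bool.false_eq_true]
  apply List.countP_congr
  intro i hmem
  have hm := List.mem_range'_1.mp hmem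
  have h2i : 2 * i ≤ cs.length := by omega
  simp only [decide_eq_true_eq]
  constructor
  · rintro ⟨-, -, hgi, hte⟩
    exact ⟨hgi, (take_eq_iff_le_lcp cs i h2i).mp hte⟩
  · rintro ⟨hgi, hle⟩
    exact ⟨by omega, h0, hgi, (take_eq_iff_le_lcp cs i h2i).mpr hle⟩

theorem calc_eq (N : String) : calculate N = calculate_alt N := by
  have hA : calculate N = ((List.range (N.toList.length / 2 + 1)).countP
      (fun i => decide (1 ≤ i ∧ N.toList.getD 0 'a' ≠ '0' ∧ N.toList.getD i 'a' ≠ '0' ∧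
        N.toList.take i = (N.toList.drop i).take i)) : Int) := by
    unfold calculate
    simp only []
    exact (PySem.List.foldl_congr_mem _ _
      (fun (acc : Int) (i : Nat) => if 1 ≤ i ∧ N.toList.getD 0 'a' ≠ '0' ∧ N.toList.getD i 'a' ≠ '0' ∧
        N.toList.take i = (N.toList.drop i).take i then acc + 1 else acc) _
      (fun acc i hmem => stepA N.toList i (by
        have := List.mem_range.mp hmem; omega) acc)).trans
      (by rw [PySem.List.foldl_ite_add_one]; simp)
  by_cases hn : N.toList.length = 0
  · rw [hA]
    have hrw : N.toList.length / 2 + 1 = 1 := by omega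
    rw [hrw]
    unfold calculate_alt
    simp only []
    rw [if_pos hn]
    simp [List.range]
  · by_cases h0 : N.toList.getD 0 'a' = '0'
    · have hz0 : (List.range (N.toList.length / 2 + 1)).countP
          (fun i => decide (1 ≤ i ∧ N.toList.getD 0 'a' ≠ '0' ∧ N.toList.getD i 'a' ≠ '0' ∧
            N.toList.take i = (N.toList.drop i).take i)) = 0 :=
        List.countP_eq_zero.mpr (fun i _ h => (of_decide_eq_true h).2.1 h0)
      rw [hA, hz0]
      unfold calculate_alt
      simp only []
      rw [if_neg hn, if_pos h0]
      simp
    · have hzc : ∀ i, 1 ≤ i → i < N.toList.length →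
          (zLoop N.toList 1 (List.replicate N.toList.length 0) 0 0).getD i 0 =
            lcp N.toList (N.toList.drop i) := by
        intro i h1 h2
        exact zLoop_correct N.toList 1 (List.replicate N.toList.length 0) 0 0 (le_refl 1)
          ⟨by simp, by intro j hj1 hj2; omega, Or.inl ⟨rfl, rfl⟩⟩ i h1 h2
      have hB : calculate_alt N = ((List.range' 1 (N.toList.length / 2)).countP
          (fun i => decide (N.toList.getD i 'a' ≠ '0' ∧ i ≤ lcp N.toList (N.toList.drop i))) : Int) := by
        unfold calculate_alt
        simp only []
        rw [if_neg hn, if_neg h0]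
        exact (PySem.List.foldl_congr_mem _ _
          (fun (acc : Int) (i : Nat) => if N.toList.getD i 'a' ≠ '0' ∧ i ≤ lcp N.toList (N.toList.drop i)
            then acc + 1 else acc) _
          (fun acc i hmem => by
            have hm := List.mem_range'_1.mp hmem
            simp only [hzc i (by omega) (by omega)])).trans
          (by rw [PySem.List.foldl_ite_add_one]; simp)
      rw [hA, hB]
      exact congrArg Nat.cast (countP_eq_final N.toList h0)

-- ===== VERDICT (by name: the statement is the Claim_ definition above) =====
theorem calculate_spec : Claim_equal_calculate := by
  intro N _
  unfold Spec_calculate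
  exact calc_eq N
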